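-- pv_equiv track=rewrite | github.com/MGankin/PyH-W | Exercise1.py | is_base
-- ===== SOURCE A (Python) =====
-- def is_base(base,number):
--     number_symbols=[]
--     base_symbols = []
--     for n in range(base):
--         base_symbols.append(str(n))
--     for n in range(len(str(number))):
--         a=str(number)
--         number_symbols.append(a[n])
--     base_symbols=map(int,base_symbols)
--     number_symbols = map(int,number_symbols)
--     result = set(number_symbols) - set(base_symbols)
--     if len(result) == 0:
--         return(True)
--     else:
--         return(False)
-- ===== SOURCE B (Python) =====
-- def is_base(base, number):
--     return all(int(d) < base for d in str(number))
-- ===== Notes on version B (the rewrite author's own statement) =====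
-- stated objective: idiomatic
-- what changed: B drops A's build-table/build-list/set-subtract pipeline (a list of str(n) for every n in range(base), a second list of the number's characters, two map(int,...) passes and a set difference) and instead makes one short-circuiting pass over str(number), testing each decimal digit directly with all(int(d) < base).
import Mathlib
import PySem

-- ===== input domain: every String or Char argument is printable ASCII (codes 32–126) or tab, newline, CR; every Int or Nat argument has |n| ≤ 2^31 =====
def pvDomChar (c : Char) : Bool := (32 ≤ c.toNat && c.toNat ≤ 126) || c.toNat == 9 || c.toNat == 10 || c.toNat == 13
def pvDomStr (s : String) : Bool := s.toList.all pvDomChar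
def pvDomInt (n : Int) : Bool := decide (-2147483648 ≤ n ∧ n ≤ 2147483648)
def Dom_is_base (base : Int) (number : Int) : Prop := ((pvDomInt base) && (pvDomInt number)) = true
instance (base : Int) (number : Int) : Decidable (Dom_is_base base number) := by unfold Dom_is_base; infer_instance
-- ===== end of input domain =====

-- B replaces A's table-of-allowed-symbols + set-difference pipeline with one direct pass
-- over the digits of str(number), testing each digit value against base (idiomatic/faster).

-- ===== PORT A =====
-- literal transliteration of A: build base_symbols = [str(n) for n in range(base)],
-- number_symbols = the characters of str(number) collected by index, map int over both
-- (int() is PySem.Int.ofStr?/ofChars?; the .getD 0 is only reached where Python would raise,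
-- which Pre_ excludes), subtract the sets and test emptiness.
def is_base (base : Int) (number : Int) : Bool :=
  let base_symbols : List String :=
    (PySem.List.pyRange 0 base 1).foldl (fun acc n => acc ++ [PySem.Int.toStr n]) []
  let a : List Char := (PySem.Int.toStr number).toList
  let number_symbols : List Char :=
    (PySem.List.pyRange 0 (PySem.List.len a) 1).foldl
      (fun acc n => acc ++ [PySem.List.pyGetD a n ' ']) []
  let base_ints : List Int := base_symbols.map (fun s => (PySem.Int.ofStr? s).getD 0)
  let number_ints : List Int := number_symbols.map (fun c => (PySem.Int.ofChars? [c]).getD 0)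
  let result := PySem.Set.diff (PySem.Set.ofList number_ints) (PySem.Set.ofList base_ints)
  if PySem.Set.len result == 0 then true else false

-- ===== PORT B =====
-- literal transliteration of B: all(int(d) < base for d in str(number))
def is_base_alt (base : Int) (number : Int) : Bool :=
  (PySem.Int.toStr number).toList.all (fun d => (PySem.Int.ofChars? [d]).getD 0 < base)

-- ===== PRECONDITION & SPEC =====
-- Pre_ excludes number < 0: there str(number) starts with '-' and int('-') raises ValueError
-- in both A and B.
def Pre_is_base (base : Int) (number : Int) : Prop := 0 ≤ number
instance (base : Int) (number : Int) : Decidable (Pre_is_base base number) := by unfold Pre_is_base; infer_instance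
def pvWitness_is_base : Int × Int := (8, 17)
def Spec_is_base (base : Int) (number : Int) (out : Bool) : Prop := out = is_base_alt base number
instance (base : Int) (number : Int) (out : Bool) : Decidable (Spec_is_base base number out) := by unfold Spec_is_base; infer_instance

-- ===== CLAIM (what is proved, stated in full; the proofs are below) =====
def Claim_equal_is_base : Prop := ∀ (base : Int) (number : Int), Dom_is_base base number → Pre_is_base base number → Spec_is_base base number (is_base base number)

-- ===== LEMMAS AND PROOFS =====

-- every character produced by Nat.toDigitsCore base 10 is either from the accumulator
-- or a decimal digit character Nat.digitChar k with k < 10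
theorem mem_toDigitsCore_ten (fuel : Nat) : ∀ (n : Nat) (acc : List Char) (c : Char),
    c ∈ Nat.toDigitsCore 10 fuel n acc → c ∈ acc ∨ ∃ k, k < 10 ∧ c = Nat.digitChar k := by
  induction fuel with
  | zero => intro n acc c h; exact Or.inl h
  | succ fuel ih =>
    intro n acc c h
    simp only [Nat.toDigitsCore] at h
    by_cases h10 : n / 10 = 0
    · simp only [h10] at h
      rcases List.mem_cons.mp h with h | h
      · exact Or.inr ⟨n % 10, Nat.mod_lt _ (by omega), h⟩
      · exact Or.inl h
    · rw [if_neg h10] at h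
      rcases ih (n / 10) (Nat.digitChar (n % 10) :: acc) c h with h | h
      · rcases List.mem_cons.mp h with h | h
        · exact Or.inr ⟨n % 10, Nat.mod_lt _ (by omega), h⟩
        · exact Or.inl h
      · exact Or.inr h

theorem mem_toDigits_ten (n : Nat) (c : Char) (h : c ∈ Nat.toDigits 10 n) :
    ∃ k, k < 10 ∧ c = Nat.digitChar k := by
  rcases mem_toDigitsCore_ten (n + 1) n [] c h with h | h
  · cases h
  · exact h

-- the single-character int() value of a decimal digit character
theorem val_digitChar (k : Nat) (hk : k < 10) :
    (PySem.Int.ofChars? [Nat.digitChar k]).getD 0 = (k : Int) := by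
  interval_cases k <;> decide

-- int(str(v)) = v for the one-digit values 0..9 (the only base-table entries that can
-- coincide with a digit of the number)
theorem small_roundtrip (v : Int) (h0 : 0 ≤ v) (h9 : v ≤ 9) :
    (PySem.Int.ofStr? (PySem.Int.toStr v)).getD 0 = v := by
  interval_cases v <;> decide

-- each digit value of str(number), number ≥ 0, lies in [0, 9]
theorem digit_val_bounds (number : Int) (hn : 0 ≤ number) (c : Char)
    (hc : c ∈ (PySem.Int.toStr number).toList) :
    0 ≤ (PySem.Int.ofChars? [c]).getD 0 ∧ (PySem.Int.ofChars? [c]).getD 0 ≤ 9 := by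
  rw [PySem.Int.toList_toStr] at hc
  simp only [PySem.Int.toChars, if_neg (not_lt.mpr hn)] at hc
  obtain ⟨k, hk, rfl⟩ := mem_toDigits_ten _ _ hc
  rw [val_digitChar k hk]
  omega

-- emptiness of a set difference is pointwise membership
theorem set_diff_len_zero {s t : PySem.Set Int} :
    (PySem.Set.len (PySem.Set.diff s t) == 0) = true ↔ ∀ x ∈ s, x ∈ t := by
  simp only [PySem.Set.len, PySem.Set.diff, PySem.Set.contains, beq_iff_eq,
    Nat.cast_eq_zero, List.length_eq_zero_iff, List.filter_eq_nil_iff,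
    Bool.not_eq_eq_eq_not, Bool.not_true, List.contains_eq_mem, decide_eq_false_iff_not,
    not_not]

-- ===== VERDICT (by name: the statement is the Claim_ definition above) =====
theorem is_base_spec : Claim_equal_is_base := by
  intro base number _hdom hpre
  unfold Spec_is_base is_base is_base_alt
  simp only [PySem.List.foldl_append_singleton_eq_map, List.nil_append,
    PySem.List.len_eq, PySem.List.map_pyGetD_pyRange_zero']
  set cs := (PySem.Int.toStr number).toList with hcs
  set g : Int → Int := fun n => (PySem.Int.ofStr? (PySem.Int.toStr n)).getD 0 with hg
  set val : Char → Int := fun c => (PySem.Int.ofChars? [c]).getD 0 with hval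
  rw [show (List.map (fun s => (PySem.Int.ofStr? s).getD 0)
        (List.map PySem.Int.toStr (PySem.List.pyRange 0 base 1)))
      = (PySem.List.pyRange 0 base 1).map g by rw [List.map_map]; rfl]
  by_cases h : ∀ c ∈ cs, val c < base
  · -- every digit is < base: the difference is empty and all() is true
    have hall : cs.all (fun d => val d < base) = true := by
      simp only [List.all_eq_true, decide_eq_true_eq]; exact h
    rw [hall, if_pos]
    rw [set_diff_len_zero]
    intro x hx
    rw [PySem.Set.mem_ofList] at hx ⊢
    obtain ⟨c, hc, rfl⟩ := List.mem_map.mp hx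
    obtain ⟨h0, h9⟩ := digit_val_bounds number hpre c hc
    refine List.mem_map.mpr ⟨val c, ?_, small_roundtrip _ h0 h9⟩
    exact PySem.List.mem_pyRange_one.mpr ⟨h0, h c hc⟩
  · -- some digit v ≥ base: v is in the number set but not in the base set
    push Not at h
    obtain ⟨c, hc, hge⟩ := h
    have hallf : cs.all (fun d => val d < base) = false := by
      simp only [List.all_eq_false]
      exact ⟨c, hc, by simpa using hge⟩
    rw [hallf, if_neg]
    intro hlen
    rw [set_diff_len_zero] at hlen
    obtain ⟨h0, h9⟩ := digit_val_bounds number hpre c hc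
    have hv : val c ∈ PySem.Set.ofList (cs.map val) :=
      (PySem.Set.mem_ofList _ _).mpr (List.mem_map.mpr ⟨c, hc, rfl⟩)
    have := (PySem.Set.mem_ofList _ _).mp (hlen _ hv)
    obtain ⟨n, hn, hgn⟩ := List.mem_map.mp this
    obtain ⟨hn0, hnb⟩ := PySem.List.mem_pyRange_one.mp hn
    have hge' : base ≤ (PySem.Int.ofChars? [c]).getD 0 := hge
    have hgn' : g n = (PySem.Int.ofChars? [c]).getD 0 := hgn
    have : g n = n := small_roundtrip n hn0 (by omega)
    omega
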